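-- pv_equiv track=rewrite | github.com/exstyle/collatz-glued-grid-seam-automaton | code/glued_grid_checker.py | simulate_block_and_count_seams
-- ===== SOURCE A (Python) =====
-- def nu2(n: int) -> int:
--     """2-adic valuation: highest e s.t. 2^e divides n (n>0)."""
--     if n <= 0:
--         raise ValueError("nu2 requires n>0")
--     e = 0
--     while n % 2 == 0:
--         n //= 2
--         e += 1
--     return e
--
-- def oddize(n: int) -> int:
--     """Remove all factors of 2."""
--     return n // (1 << nu2(n)) if n > 0 else 0
--
-- def T_odd(y: int) -> int:
--     """Odd-only Collatz step T(y) = oddize(3y+1), y odd > 0."""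
--     assert y > 0 and (y % 2 == 1)
--     return oddize(3*y + 1)
--
-- def seam_kappas(k: int):
--     """
--     Décompose k = sum κi avec κi ∈ {1,2}.
--     Choix canonique: le plus de 2 possible, puis 1 si k impair.
--     """
--     if k <= 0:
--         return []
--     ks = []
--     while k >= 2:
--         ks.append(2)
--         k -= 2
--     if k == 1:
--         ks.append(1)
--     return ks
--
-- def simulate_block_and_count_seams(y0: int, steps: int):
--     """
--     Simule 'steps' pas impairs, collecte:
--       - la liste k_i = nu2(3y_i+1),
--       - la décomposition en κ ∈ {1,2} pour chaque pas,
--       - S total (nombre de coutures),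
--       - la somme des κ (doit valoir sum k_i),
--       - vérifie S >= steps.
--     """
--     assert y0 > 0 and y0 % 2 == 1
--     y = y0
--     Ks = []
--     kappas = []
--     for _ in range(steps):
--         k = nu2(3*y + 1)
--         Ks.append(k)
--         kappas.extend(seam_kappas(k))
--         y = T_odd(y)
--     S = len(kappas)
--     assert S >= steps, f"Chaque pas impair doit avoir au moins une couture: S={S}, steps={steps}"
--     assert sum(kappas) == sum(Ks), f"Somme κ ({sum(kappas)}) != somme k_i ({sum(Ks)})"
--     return Ks, kappas, S
-- ===== SOURCE B (Python) =====
-- def simulate_block_and_count_seams(y0: int, steps: int):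
--     assert y0 > 0 and y0 % 2 == 1
--     y = y0
--     Ks = []
--     for _ in range(steps):
--         m = 3 * y + 1
--         k = (m & -m).bit_length() - 1   # closed-form 2-adic valuation
--         Ks.append(k)
--         y = m >> k
--     kappas = [t for k in Ks for t in [2] * (k // 2) + [1] * (k % 2)]
--     return Ks, kappas, len(kappas)
-- ===== Notes on version B (the rewrite author's own statement) =====
-- stated objective: faster
-- what changed: The division while-loop valuation nu2 is replaced by the closed-form bit trick (m & -m).bit_length() - 1, the odd part is obtained by a single shift m >> k instead of oddize's recomputed valuation and division loop, and the incremental seam_kappas while-loop accumulation is replaced by one closed-form comprehension [2]*(k//2)+[1]*(k%2) over the collected valuations after the loop.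
import Mathlib
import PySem

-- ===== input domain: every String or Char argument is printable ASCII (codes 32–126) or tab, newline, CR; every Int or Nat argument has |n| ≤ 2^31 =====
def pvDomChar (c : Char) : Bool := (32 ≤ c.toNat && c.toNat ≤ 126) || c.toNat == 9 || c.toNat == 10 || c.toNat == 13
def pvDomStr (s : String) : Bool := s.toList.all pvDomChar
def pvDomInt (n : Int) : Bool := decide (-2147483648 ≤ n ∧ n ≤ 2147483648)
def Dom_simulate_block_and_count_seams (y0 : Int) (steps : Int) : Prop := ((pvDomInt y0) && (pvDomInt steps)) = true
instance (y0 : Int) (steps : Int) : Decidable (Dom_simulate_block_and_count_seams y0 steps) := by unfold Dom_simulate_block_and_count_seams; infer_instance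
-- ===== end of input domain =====

-- B replaces A's two inner while-loops by closed forms: the bit-trick valuation (m & -m).bit_length() - 1
-- plus a single shift for the odd part, and one post-loop comprehension for the seam decomposition (objective: faster by a constant factor, measured).

-- ===== PORT A =====
-- while n % 2 == 0: n //= 2; e += 1   (the '0 < n' conjunct is only a totality guard: nu2 is
-- entered with n > 0, which the loop preserves, so it never changes the computed value)
def pvNu2Loop (n : Int) (e : Int) : Int :=
  if h : 0 < n ∧ PySem.Int.mod n 2 = 0 then pvNu2Loop (PySem.Int.floordiv n 2) (e + 1) else e
  termination_by n.toNat
  decreasing_by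
    rw [PySem.Int.floordiv_eq_ediv_of_pos (by omega : (0:Int) < 2)]; omega

-- nu2: raises ValueError for n ≤ 0 (never reached under Pre_); the returned 0 there is junk
def pvNu2 (n : Int) : Int := if n ≤ 0 then 0 else pvNu2Loop n 0

-- oddize: n // (1 << nu2(n)) if n > 0 else 0   (shift amount nu2(n) is ≥ 0, so .toNat is exact)
def pvOddize (n : Int) : Int :=
  if 0 < n then PySem.Int.floordiv n ((1:Int) <<< (pvNu2 n).toNat) else 0

def pvTodd (y : Int) : Int := pvOddize (3 * y + 1)

-- while k >= 2: ks.append(2); k -= 2; then: if k == 1: ks.append(1)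
def pvSeamLoop (k : Int) (ks : List Int) : List Int :=
  if h : 2 ≤ k then pvSeamLoop (k - 2) (ks ++ [2]) else if k = 1 then ks ++ [1] else ks
  termination_by k.toNat
  decreasing_by omega

def pvSeamKappas (k : Int) : List Int := if k ≤ 0 then [] else pvSeamLoop k []

-- loop body: k = nu2(3*y+1); Ks.append(k); kappas.extend(seam_kappas(k)); y = T_odd(y)
def pvStepA (s : Int × List Int × List Int) (_i : Int) : Int × List Int × List Int :=
  let k := pvNu2 (3 * s.1 + 1)
  (pvTodd s.1, s.2.1 ++ [k], s.2.2 ++ pvSeamKappas k)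

def simulate_block_and_count_seams (y0 : Int) (steps : Int) : List Int × List Int × Int :=
  if 0 < y0 ∧ PySem.Int.mod y0 2 = 1 then
    let st := (PySem.List.pyRange 0 steps 1).foldl pvStepA (y0, [], [])
    (st.2.1, st.2.2, PySem.List.len st.2.2)
  else ([], [], 0)   -- AssertionError: outside Pre_

-- ===== PORT B =====
-- [2] * (k // 2) + [1] * (k % 2)
def pvKappaOf (k : Int) : List Int :=
  PySem.List.pyRepeat [2] (PySem.Int.floordiv k 2) ++ PySem.List.pyRepeat [1] (PySem.Int.mod k 2)

-- loop body: m = 3*y+1; k = (m & -m).bit_length() - 1; Ks.append(k); y = m >> k  (k ≥ 0 under Pre_, so .toNat is exact)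
def pvStepB (s : Int × List Int) (_i : Int) : Int × List Int :=
  let m := 3 * s.1 + 1
  let k : Int := (PySem.Int.bitLength (PySem.Int.band m (-m)) : Int) - 1
  (m >>> k.toNat, s.2 ++ [k])

def simulate_block_and_count_seams_alt (y0 : Int) (steps : Int) : List Int × List Int × Int :=
  if 0 < y0 ∧ PySem.Int.mod y0 2 = 1 then
    let st := (PySem.List.pyRange 0 steps 1).foldl pvStepB (y0, [])
    let kappas := st.2.flatMap pvKappaOf
    (st.2, kappas, PySem.List.len kappas)
  else ([], [], 0)   -- AssertionError: outside Pre_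

-- ===== PRECONDITION & SPEC =====
-- Pre_: exactly A's entry assert 'y0 > 0 and y0 % 2 == 1'; outside it A raises AssertionError
def Pre_simulate_block_and_count_seams (y0 : Int) (steps : Int) : Prop :=
  0 < y0 ∧ PySem.Int.mod y0 2 = 1
instance (y0 : Int) (steps : Int) : Decidable (Pre_simulate_block_and_count_seams y0 steps) := by
  unfold Pre_simulate_block_and_count_seams; infer_instance

def pvWitness_simulate_block_and_count_seams : Int × Int := (7, 5)

def Spec_simulate_block_and_count_seams (y0 : Int) (steps : Int) (out : List Int × List Int × Int) : Prop := out = simulate_block_and_count_seams_alt y0 steps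
instance (y0 : Int) (steps : Int) (out : List Int × List Int × Int) : Decidable (Spec_simulate_block_and_count_seams y0 steps out) := by unfold Spec_simulate_block_and_count_seams; infer_instance

-- ===== CLAIM (what is proved, stated in full; the proofs are below) =====
def Claim_equal_simulate_block_and_count_seams : Prop := ∀ (y0 : Int) (steps : Int), Dom_simulate_block_and_count_seams y0 steps → Pre_simulate_block_and_count_seams y0 steps → Spec_simulate_block_and_count_seams y0 steps (simulate_block_and_count_seams y0 steps)

-- ===== LEMMAS AND PROOFS =====

-- 2-adic valuation on Nat, the common yardstick for both ports
def pvNuNat (p : Nat) : Nat :=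
  if h : p % 2 = 0 ∧ 0 < p then pvNuNat (p / 2) + 1 else 0
  termination_by p
  decreasing_by omega

lemma pvNuNat_odd {p : Nat} (h : p % 2 = 1) : pvNuNat p = 0 := by
  rw [pvNuNat]; rw [dif_neg (by omega)]

lemma pvNuNat_even {p : Nat} (h2 : p % 2 = 0) (h0 : 0 < p) : pvNuNat p = pvNuNat (p / 2) + 1 := by
  rw [pvNuNat]; rw [dif_pos ⟨h2, h0⟩]

lemma pvNu2Loop_eq (p : Nat) (e : Int) (hp : 0 < p) :
    pvNu2Loop (p : Int) e = e + (pvNuNat p : Int) := by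
  induction p using Nat.strong_induction_on generalizing e with
  | _ p ih =>
    rw [pvNu2Loop]
    have hmod : PySem.Int.mod (p:Int) 2 = ((p % 2 : Nat) : Int) := by
      exact_mod_cast PySem.Int.mod_natCast p 2
    by_cases h2 : p % 2 = 0
    · have hcond : (0:Int) < (p:Int) ∧ PySem.Int.mod (p:Int) 2 = 0 := by
        constructor
        · exact_mod_cast hp
        · rw [hmod]; exact_mod_cast h2
      rw [dif_pos hcond]
      have hf : PySem.Int.floordiv (p : Int) 2 = ((p / 2 : Nat) : Int) := by
        exact_mod_cast PySem.Int.floordiv_natCast p 2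
      rw [hf, ih (p / 2) (by omega) (e + 1) (by omega), pvNuNat_even h2 hp]
      push_cast; ring
    · have hc : ¬((0:Int) < (p:Int) ∧ PySem.Int.mod (p:Int) 2 = 0) := by
        rw [hmod]; omega
      rw [dif_neg hc, pvNuNat_odd (show p % 2 = 1 by omega)]
      simp

lemma pvNuNat_factor (p : Nat) (hp : 0 < p) :
    ∃ q, q % 2 = 1 ∧ p = 2 ^ pvNuNat p * q := by
  induction p using Nat.strong_induction_on with
  | _ p ih =>
    by_cases h2 : p % 2 = 0
    · obtain ⟨q, hq, hpq⟩ := ih (p / 2) (by omega) (by omega)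
      refine ⟨q, hq, ?_⟩
      rw [pvNuNat_even h2 hp, pow_succ]
      have hr : 2 ^ pvNuNat (p / 2) * 2 * q = 2 * (2 ^ pvNuNat (p / 2) * q) := by ring
      rw [hr, ← hpq]
      omega
    · exact ⟨p, by omega, by rw [pvNuNat_odd (by omega)]; simp⟩

-- bit identities behind (m & -m)
lemma pvLandOdd (p : Nat) (h : p % 2 = 1) : p &&& (p - 1) = p - 1 := by
  apply Nat.eq_of_testBit_eq
  intro i
  rw [Nat.testBit_and]
  cases i with
  | zero =>
    rw [Nat.testBit_zero, Nat.testBit_zero]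
    have : (p - 1) % 2 = 0 := by omega
    simp [this]
  | succ i =>
    rw [Nat.testBit_add_one, Nat.testBit_add_one]
    have hpe : p / 2 = (p - 1) / 2 := by omega
    rw [hpe, Bool.and_self]

lemma pvLandEven (j : Nat) (hj : 0 < j) :
    (2 * j) &&& (2 * j - 1) = 2 * (j &&& (j - 1)) := by
  apply Nat.eq_of_testBit_eq
  intro i
  rw [Nat.testBit_and]
  cases i with
  | zero =>
    rw [Nat.testBit_zero, Nat.testBit_zero, Nat.testBit_zero]
    have h1 : (2 * j) % 2 = 0 := by omega
    have h2 : (2 * (j &&& (j - 1))) % 2 = 0 := by omega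
    simp [h1, h2]
  | succ i =>
    rw [Nat.testBit_add_one, Nat.testBit_add_one, Nat.testBit_add_one]
    have e1 : 2 * j / 2 = j := by omega
    have e2 : (2 * j - 1) / 2 = j - 1 := by omega
    have e3 : 2 * (j &&& (j - 1)) / 2 = j &&& (j - 1) := by omega
    rw [e1, e2, e3, Nat.testBit_and]

lemma pvLowBit (p : Nat) (hp : 0 < p) : p - (p &&& (p - 1)) = 2 ^ pvNuNat p := by
  induction p using Nat.strong_induction_on with
  | _ p ih =>
    by_cases h2 : p % 2 = 0
    · have hj : 0 < p / 2 := by omega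
      have hp2 : p = 2 * (p / 2) := by omega
      calc p - (p &&& (p - 1))
          = 2 * (p / 2) - (2 * (p / 2) &&& (2 * (p / 2) - 1)) := by rw [← hp2]
        _ = 2 * (p / 2) - 2 * ((p / 2) &&& (p / 2 - 1)) := by rw [pvLandEven _ hj]
        _ = 2 * (p / 2 - ((p / 2) &&& (p / 2 - 1))) := by
              have := Nat.and_le_left (n := p / 2) (m := p / 2 - 1); omega
        _ = 2 * 2 ^ pvNuNat (p / 2) := by rw [ih (p / 2) (by omega) hj]
        _ = 2 ^ pvNuNat p := by rw [pvNuNat_even h2 hp, pow_succ]; ring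
    · rw [pvLandOdd p (by omega), pvNuNat_odd (by omega)]
      omega

lemma pvBandNeg (p : Nat) (hp : 0 < p) :
    PySem.Int.band (p : Int) (-(p : Int)) = ((p - (p &&& (p - 1)) : Nat) : Int) := by
  unfold PySem.Int.band
  rw [if_pos (by positivity), if_neg (by omega)]
  congr 1
  have h1 : ((p : Int)).toNat = p := by simp
  have h2 : (-(-(p:Int)) - 1).toNat = p - 1 := by omega
  rw [h1, h2]

lemma pvBitLengthPow (k : Nat) : PySem.Int.bitLength ((2 ^ k : Nat) : Int) = k + 1 := by
  induction k with
  | zero => decide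
  | succ k ih =>
    have h := PySem.Int.bitLength_natCast (m := 2 ^ (k + 1)) (by positivity)
    rw [h]
    have : 2 ^ (k + 1) / 2 = 2 ^ k := by rw [pow_succ]; omega
    rw [this, ih]

-- per-step agreement: for y > 0 odd and m = 3y+1, both ports compute k = ν₂(m) and y' = m / 2^k
lemma pvStep_core (y : Int) (hy : 0 < y) (hodd : PySem.Int.mod y 2 = 1) :
    ∃ (ν q : Nat), q % 2 = 1 ∧
      pvNu2 (3 * y + 1) = (ν : Int) ∧
      ((PySem.Int.bitLength (PySem.Int.band (3 * y + 1) (-(3 * y + 1))) : Int) - 1) = (ν : Int) ∧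
      pvTodd y = (q : Int) ∧
      (3 * y + 1) >>> ((ν : Int)).toNat = (q : Int) := by
  have hym : y % 2 = 1 := by
    have := PySem.Int.mod_eq_emod_of_pos (a := y) (b := 2) (by omega); omega
  set m : Int := 3 * y + 1 with hm
  have hmpos : 0 < m := by omega
  set p : Nat := m.toNat with hp
  have hpc : (p : Int) = m := by omega
  have hppos : 0 < p := by omega
  obtain ⟨q, hqodd, hfac⟩ := pvNuNat_factor p hppos
  set ν : Nat := pvNuNat p with hν
  refine ⟨ν, q, hqodd, ?_, ?_, ?_, ?_⟩
  · unfold pvNu2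
    rw [if_neg (by omega), ← hpc, pvNu2Loop_eq p 0 hppos, zero_add]
  · rw [← hpc, pvBandNeg p hppos, pvLowBit p hppos, pvBitLengthPow ν]
    push_cast; ring
  · unfold pvTodd pvOddize
    rw [← hm, if_pos hmpos]
    have hk : pvNu2 m = (ν : Int) := by
      unfold pvNu2; rw [if_neg (by omega), ← hpc, pvNu2Loop_eq p 0 hppos, zero_add]
    rw [hk]
    have hsh : ((1:Int) <<< ((ν : Int)).toNat) = ((2 ^ ν : Nat) : Int) := by
      simp [Int.shiftLeft_eq]
    rw [hsh, ← hpc, PySem.Int.floordiv_natCast p (2 ^ ν)]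
    congr 1
    rw [hfac]
    exact Nat.mul_div_cancel_left _ (by positivity)
  · rw [← hpc, Int.shiftRight_eq_div_pow]
    have : (((ν : Int)).toNat) = ν := by simp
    rw [this]
    rw [hfac]
    push_cast
    rw [Int.mul_ediv_cancel_left _ (by positivity)]

-- seam loop closed form
lemma pvSeamLoop_spec (n : Nat) (acc : List Int) :
    pvSeamLoop (n : Int) acc =
      acc ++ List.replicate (n / 2) 2 ++ (if n % 2 = 1 then [1] else []) := by
  induction n using Nat.strong_induction_on generalizing acc with
  | _ n ih =>
    rw [pvSeamLoop]
    by_cases h2 : 2 ≤ n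
    · rw [dif_pos (by exact_mod_cast h2)]
      have hc : (n : Int) - 2 = ((n - 2 : Nat) : Int) := by omega
      rw [hc, ih (n - 2) (by omega)]
      have hd : n / 2 = (n - 2) / 2 + 1 := by omega
      have hmm : n % 2 = (n - 2) % 2 := by omega
      rw [hd, hmm, List.replicate_succ]
      simp
    · rw [dif_neg (by exact_mod_cast h2)]
      interval_cases n
      · simp
      · simp

lemma pvKappa_eq (k : Int) (hk : 0 ≤ k) : pvSeamKappas k = pvKappaOf k := by
  set n : Nat := k.toNat with hn
  have hkc : (n : Int) = k := by omega
  unfold pvSeamKappas pvKappaOf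
  have hf : PySem.Int.floordiv (n : Int) 2 = ((n / 2 : Nat) : Int) := by
    exact_mod_cast PySem.Int.floordiv_natCast n 2
  have hm : PySem.Int.mod (n : Int) 2 = ((n % 2 : Nat) : Int) := by
    exact_mod_cast PySem.Int.mod_natCast n 2
  rw [← hkc, hf, hm, PySem.List.pyRepeat_singleton, PySem.List.pyRepeat_singleton]
  by_cases h0 : n = 0
  · rw [h0]; norm_num
  · rw [if_neg (by omega), pvSeamLoop_spec n []]
    have h1 : (((n / 2 : Nat) : Int)).toNat = n / 2 := by omega
    have h2 : (((n % 2 : Nat) : Int)).toNat = n % 2 := by omega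
    rw [h1, h2]
    rcases Nat.mod_two_eq_zero_or_one n with h | h <;> simp [h]

-- the two folds agree (same y and Ks, and A's kappas are the flatMap of the Ks so far)
lemma pvFoldMain (l : List Int) (y : Int) (Ks : List Int)
    (hy : 0 < y) (hodd : PySem.Int.mod y 2 = 1) :
    l.foldl pvStepA (y, Ks, Ks.flatMap pvKappaOf) =
      ((l.foldl pvStepB (y, Ks)).1, (l.foldl pvStepB (y, Ks)).2,
        (l.foldl pvStepB (y, Ks)).2.flatMap pvKappaOf) := by
  induction l generalizing y Ks with
  | nil => simp
  | cons x l ih =>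
    obtain ⟨ν, q, hqodd, hA, hB, hT, hS⟩ := pvStep_core y hy hodd
    have hq0 : 0 < (q : Int) := by
      have : 0 < q := by omega
      exact_mod_cast this
    have hqm : PySem.Int.mod (q : Int) 2 = 1 := by
      have := PySem.Int.mod_natCast q 2
      rw [hqodd] at this
      exact_mod_cast this
    have hstepA : pvStepA (y, Ks, Ks.flatMap pvKappaOf) x =
        ((q : Int), Ks ++ [(ν : Int)], (Ks ++ [(ν : Int)]).flatMap pvKappaOf) := by
      show (pvTodd y, Ks ++ [pvNu2 (3 * y + 1)],
        Ks.flatMap pvKappaOf ++ pvSeamKappas (pvNu2 (3 * y + 1))) = _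
      rw [hA, hT, pvKappa_eq (ν : Int) (by positivity)]
      simp [List.flatMap_append]
    have hstepB : pvStepB (y, Ks) x = ((q : Int), Ks ++ [(ν : Int)]) := by
      show ((3 * y + 1) >>> ((PySem.Int.bitLength (PySem.Int.band (3 * y + 1) (-(3 * y + 1))) : Int) - 1).toNat,
        Ks ++ [(PySem.Int.bitLength (PySem.Int.band (3 * y + 1) (-(3 * y + 1))) : Int) - 1]) = _
      rw [hB, hS]
    rw [List.foldl_cons, List.foldl_cons, hstepA, hstepB]
    exact ih (q : Int) (Ks ++ [(ν : Int)]) hq0 hqm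

-- ===== VERDICT (by name: the statement is the Claim_ definition above) =====
theorem simulate_block_and_count_seams_spec : Claim_equal_simulate_block_and_count_seams := by
  intro y0 steps _hdom hpre
  unfold Spec_simulate_block_and_count_seams
  obtain ⟨hy, hodd⟩ := hpre
  unfold simulate_block_and_count_seams simulate_block_and_count_seams_alt
  rw [if_pos ⟨hy, hodd⟩, if_pos ⟨hy, hodd⟩]
  have h := pvFoldMain (PySem.List.pyRange 0 steps 1) y0 [] hy hodd
  simp only [List.flatMap_nil] at h
  simp only [h]
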